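-- pv_equiv track=rewrite | github.com/amol-ship-it/agi-core | domains/arc/transformation_primitives.py | inpaint_by_neighbors
-- ===== SOURCE A (Python) =====
-- Grid = list[list[int]]
--
-- def inpaint_by_neighbors(grid: Grid) -> Grid:
--     """Fill zeros with majority color of non-zero 4-neighbors.
--
--     Iterates until no more changes or max(h,w) iterations.
--     """
--     from collections import Counter
--     if not grid or not grid[0]:
--         return grid
--     h, w = len(grid), len(grid[0])
--     result = [row[:] for row in grid]
--     max_iters = max(h, w)
--     for _ in range(max_iters):
--         changed = False
--         new = [row[:] for row in result]
--         for r in range(h):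
--             for c in range(w):
--                 if result[r][c] == 0:
--                     neighbors = []
--                     for dr, dc in ((-1, 0), (1, 0), (0, -1), (0, 1)):
--                         nr, nc = r + dr, c + dc
--                         if 0 <= nr < h and 0 <= nc < w and result[nr][nc] != 0:
--                             neighbors.append(result[nr][nc])
--                     if neighbors:
--                         new[r][c] = Counter(neighbors).most_common(1)[0][0]
--                         changed = True
--         result = new
--         if not changed:
--             break
--     return result
-- ===== SOURCE B (Python) =====
-- # Worklist re-implementation (alternative structure, same cost): keep the list of
-- # still-zero cells and each round fill only those from a snapshot of the grid
-- # (majority of nonzero 4-neighbors, ties by first occurrence), instead of rescanning and copying the whole grid.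
-- def inpaint_by_neighbors(grid):
--     if not grid or not grid[0]:
--         return grid
--     h, w = len(grid), len(grid[0])
--     res = [row[:] for row in grid]
--     pending = [(r, c) for r in range(h) for c in range(w) if res[r][c] == 0]
--     for _ in range(max(h, w)):
--         fills = []
--         for r, c in pending:
--             vals = [res[nr][nc]
--                     for nr, nc in ((r - 1, c), (r + 1, c), (r, c - 1), (r, c + 1))
--                     if 0 <= nr < h and 0 <= nc < w and res[nr][nc] != 0]
--             if vals:
--                 fills.append((r, c, max(vals, key=vals.count)))
--         if not fills:
--             break
--         for r, c, v in fills: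
--             res[r][c] = v
--         filled = {(r, c) for (r, c, _) in fills}
--         pending = [p for p in pending if p not in filled]
--     return res
-- ===== Notes on version B (the rewrite author's own statement) =====
-- stated objective: alternative
-- what changed: B keeps a worklist of the still-zero cells and each round computes fills only for those cells from a snapshot and applies them in place, instead of A's per-round full-grid copy plus h*w rescan with a Counter per cell; majority is taken with max(vals, key=vals.count) over at most 4 neighbors.
import Mathlib
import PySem

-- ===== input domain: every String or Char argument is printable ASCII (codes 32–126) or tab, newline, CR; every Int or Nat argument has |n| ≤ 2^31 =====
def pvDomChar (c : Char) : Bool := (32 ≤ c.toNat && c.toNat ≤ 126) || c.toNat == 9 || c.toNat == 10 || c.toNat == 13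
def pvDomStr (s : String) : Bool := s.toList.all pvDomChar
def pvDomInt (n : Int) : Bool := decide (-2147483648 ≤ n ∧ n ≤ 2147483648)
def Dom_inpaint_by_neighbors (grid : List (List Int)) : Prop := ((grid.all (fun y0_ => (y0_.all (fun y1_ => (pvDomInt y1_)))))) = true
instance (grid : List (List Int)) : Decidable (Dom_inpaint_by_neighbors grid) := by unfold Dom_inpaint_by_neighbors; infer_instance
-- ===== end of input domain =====

-- B replaces A's per-round full-grid rescan and copy by a worklist of the still-zero
-- cells, filled in place from a per-round snapshot (objective: alternative algorithm,
-- same cost; the return value is proved identical on Pre_).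

-- ===== PORT A =====
def pvGet2 (g : List (List Int)) (r c : Nat) : Int := (g.getD r []).getD c 0

def pvSet2 (g : List (List Int)) (r c : Nat) (v : Int) : List (List Int) :=
  g.set r ((g.getD r []).set c v)

def pvDirs : List (Int × Int) := [(-1, 0), (1, 0), (0, -1), (0, 1)]

def pvNbrsA (res : List (List Int)) (h w r c : Nat) : List Int :=
  pvDirs.foldl (fun acc d =>
    if 0 ≤ (r : Int) + d.1 ∧ (r : Int) + d.1 < (h : Int) ∧ 0 ≤ (c : Int) + d.2 ∧
        (c : Int) + d.2 < (w : Int) ∧ pvGet2 res ((r : Int) + d.1).toNat ((c : Int) + d.2).toNat ≠ 0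
    then acc ++ [pvGet2 res ((r : Int) + d.1).toNat ((c : Int) + d.2).toNat] else acc) []

-- Counter(neighbors).most_common(1)[0][0]: first counter item with maximal count
def pvMostCommon1 (xs : List Int) : Int :=
  match (PySem.Dict.counter xs).items with
  | [] => 0
  | p :: rest => (rest.foldl (fun best q => if best.2 < q.2 then q else best) p).1

def pvStepA (res : List (List Int)) (h w : Nat) : List (List Int) × Bool :=
  (List.range h).foldl (fun st r =>
    (List.range w).foldl (fun st c =>
      if pvGet2 res r c = 0 then
        if pvNbrsA res h w r c ≠ [] then
          (pvSet2 st.1 r c (pvMostCommon1 (pvNbrsA res h w r c)), true)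
        else st
      else st) st) (res.map (fun row => row), false)

def pvLoopA (h w : Nat) : Nat → List (List Int) → List (List Int)
  | 0, res => res
  | n + 1, res =>
    let st := pvStepA res h w
    if st.2 then pvLoopA h w n st.1 else st.1

def inpaint_by_neighbors (grid : List (List Int)) : List (List Int) :=
  if grid = [] ∨ grid.headI = [] then grid
  else pvLoopA grid.length grid.headI.length (max grid.length grid.headI.length)
    (grid.map (fun row => row))

-- ===== PORT B =====
def pvNbrsB (res : List (List Int)) (h w r c : Nat) : List Int :=
  [((r : Int) - 1, (c : Int)), ((r : Int) + 1, (c : Int)),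
   ((r : Int), (c : Int) - 1), ((r : Int), (c : Int) + 1)].foldl
    (fun acc p =>
      if 0 ≤ p.1 ∧ p.1 < (h : Int) ∧ 0 ≤ p.2 ∧ p.2 < (w : Int) ∧
          pvGet2 res p.1.toNat p.2.toNat ≠ 0
      then acc ++ [pvGet2 res p.1.toNat p.2.toNat] else acc) []

-- max(vals, key=vals.count): first element with maximal count
def pvMaxByCount (vals : List Int) : Int :=
  match vals with
  | [] => 0
  | v :: rest => rest.foldl (fun best x => if vals.count best < vals.count x then x else best) v

def pvZeros (res : List (List Int)) (h w : Nat) : List (Nat × Nat) :=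
  (List.range h).foldl (fun acc r =>
    (List.range w).foldl (fun acc c =>
      if pvGet2 res r c = 0 then acc ++ [(r, c)] else acc) acc) []

def pvFills (res : List (List Int)) (h w : Nat) (pending : List (Nat × Nat)) :
    List (Nat × Nat × Int) :=
  pending.foldl (fun acc p =>
    if pvNbrsB res h w p.1 p.2 ≠ [] then
      acc ++ [(p.1, p.2, pvMaxByCount (pvNbrsB res h w p.1 p.2))]
    else acc) []

def pvLoopB (h w : Nat) : Nat → List (List Int) → List (Nat × Nat) → List (List Int)
  | 0, res, _ => res
  | n + 1, res, pending =>
    let fills := pvFills res h w pending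
    if fills = [] then res
    else
      let filled : PySem.Set (Nat × Nat) := PySem.Set.ofList (fills.map (fun f => (f.1, f.2.1)))
      pvLoopB h w n (fills.foldl (fun g f => pvSet2 g f.1 f.2.1 f.2.2) res)
        (pending.filter (fun p => !(PySem.Set.contains filled p)))

def inpaint_by_neighbors_alt (grid : List (List Int)) : List (List Int) :=
  if grid = [] ∨ grid.headI = [] then grid
  else
    pvLoopB grid.length grid.headI.length (max grid.length grid.headI.length)
      (grid.map (fun row => row))
      (pvZeros (grid.map (fun row => row)) grid.length grid.headI.length)

-- ===== PRECONDITION & SPEC =====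
-- Pre_ excludes exactly the ragged grids with some row SHORTER than row 0: there the
-- Python A (and B) raises IndexError while testing the first len(grid[0]) columns of
-- every row. Rows longer than row 0 are fine (their extra cells are copied unchanged).
def Pre_inpaint_by_neighbors (grid : List (List Int)) : Prop :=
  ∀ row ∈ grid, grid.headI.length ≤ row.length

instance (grid : List (List Int)) : Decidable (Pre_inpaint_by_neighbors grid) := by
  unfold Pre_inpaint_by_neighbors; infer_instance

def pvWitness_inpaint_by_neighbors : List (List Int) := [[1, 0], [0, 2]]

def Spec_inpaint_by_neighbors (grid : List (List Int)) (out : List (List Int)) : Prop :=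
  out = inpaint_by_neighbors_alt grid
instance (grid : List (List Int)) (out : List (List Int)) :
    Decidable (Spec_inpaint_by_neighbors grid out) := by
  unfold Spec_inpaint_by_neighbors; infer_instance

-- ===== CLAIM (what is proved, stated in full; the proofs are below) =====
def Claim_equal_inpaint_by_neighbors : Prop :=
  ∀ (grid : List (List Int)), Dom_inpaint_by_neighbors grid →
    Pre_inpaint_by_neighbors grid →
    Spec_inpaint_by_neighbors grid (inpaint_by_neighbors grid)

-- ===== LEMMAS AND PROOFS =====

-- the two neighbor scans compute the same list
lemma pvNbrs_eq (res : List (List Int)) (h w r c : Nat) :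
    pvNbrsA res h w r c = pvNbrsB res h w r c := by
  simp [pvNbrsA, pvNbrsB, pvDirs, List.foldl, sub_eq_add_neg]


def pvArg (f : Int → Nat) (a : Int) (l : List Int) : Int :=
  l.foldl (fun b x => if f b < f x then x else b) a

lemma pvArg_key_le (f : Int → Nat) (a : Int) (l : List Int) :
    f a ≤ f (pvArg f a l) ∧ ∀ y ∈ l, f y ≤ f (pvArg f a l) := by
  induction l generalizing a with
  | nil => simp [pvArg]
  | cons x l ih =>
    have hstep : f a ≤ f (if f a < f x then x else a) ∧ f x ≤ f (if f a < f x then x else a) := by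
      split_ifs with h
      · exact ⟨Nat.le_of_lt h, le_refl _⟩
      · exact ⟨le_refl _, Nat.le_of_not_lt h⟩
    have ih' := ih (if f a < f x then x else a)
    have harg : pvArg f a (x :: l) = pvArg f (if f a < f x then x else a) l := rfl
    rw [harg]
    refine ⟨le_trans hstep.1 ih'.1, ?_⟩
    intro y hy
    rcases List.mem_cons.mp hy with rfl | hy
    · exact le_trans hstep.2 ih'.1
    · exact ih'.2 y hy

lemma pvArg_mem (f : Int → Nat) (a : Int) (l : List Int) :
    pvArg f a l = a ∨ pvArg f a l ∈ l := by
  induction l generalizing a with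
  | nil => simp [pvArg]
  | cons x l ih =>
    have harg : pvArg f a (x :: l) = pvArg f (if f a < f x then x else a) l := rfl
    rw [harg]
    rcases ih (if f a < f x then x else a) with h | h
    · rw [h]; split_ifs with hc
      · exact Or.inr (List.mem_cons_self)
      · exact Or.inl rfl
    · exact Or.inr (List.mem_cons_of_mem _ h)

lemma pvArg_filter_ne (f : Int → Nat) (v : Int) (l : List Int) (a : Int) (hv : f v ≤ f a) :
    pvArg f a (l.filter (fun y => y ≠ v)) = pvArg f a l := by
  induction l generalizing a with
  | nil => simp
  | cons x l ih =>
    by_cases hx : x = v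
    · subst hx
      have h1 : (x :: l).filter (fun y => y ≠ x) = l.filter (fun y => y ≠ x) := by simp
      rw [h1]
      have h2 : pvArg f a (x :: l) = pvArg f (if f a < f x then x else a) l := rfl
      have h3 : (if f a < f x then x else a) = a := by
        rw [if_neg (Nat.not_lt_of_le hv)]
      rw [h2, h3]
      exact ih a hv
    · have h1 : (x :: l).filter (fun y => y ≠ v) = x :: l.filter (fun y => y ≠ v) := by
        simp [hx]
      rw [h1]
      have h2 : pvArg f a (x :: l.filter (fun y => y ≠ v)) = pvArg f (if f a < f x then x else a) (l.filter (fun y => y ≠ v)) := rfl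
      have h3 : pvArg f a (x :: l) = pvArg f (if f a < f x then x else a) l := rfl
      rw [h2, h3]
      apply ih
      split_ifs with h
      · exact le_trans hv (Nat.le_of_lt h)
      · exact hv

lemma pvArg_dedup (f : Int → Nat) (a : Int) (l : List Int) :
    pvArg f a (PySem.Set.ofList l) = pvArg f a l := by
  induction l using List.reverseRecOn with
  | nil => simp [PySem.Set.ofList_nil]
  | append_singleton l x ih =>
    rw [PySem.Set.ofList_append_singleton, PySem.Set.add_eq_ite]
    by_cases hx : x ∈ PySem.Set.ofList l
    · rw [if_pos hx]
      have hxl : x ∈ l := (PySem.Set.mem_ofList l x).mp hx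
      have h1 : pvArg f a (l ++ [x]) = (fun b y => if f b < f y then y else b) (pvArg f a l) x := by
        simp [pvArg, List.foldl_append]
      have h2 : f x ≤ f (pvArg f a l) := (pvArg_key_le f a l).2 x hxl
      rw [ih, h1]
      simp [Nat.not_lt_of_le h2]
    · rw [if_neg hx]
      have h1 : pvArg f a (l ++ [x]) = (fun b y => if f b < f y then y else b) (pvArg f a l) x := by
        simp [pvArg, List.foldl_append]
      have h2 : pvArg f a (PySem.Set.ofList l ++ [x]) = (fun b y => if f b < f y then y else b) (pvArg f a (PySem.Set.ofList l)) x := by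
        simp [pvArg, List.foldl_append]
      rw [h1, h2, ih]

lemma pvArg_pairs (g : Int → Nat) (zs : List Int) (z : Int) :
    ((zs.map (fun k => (k, (g k : Int)))).foldl
      (fun best q => if best.2 < q.2 then q else best) (z, (g z : Int))).1 =
    pvArg g z zs := by
  induction zs generalizing z with
  | nil => simp [pvArg]
  | cons k zs ih =>
    have h1 : pvArg g z (k :: zs) = pvArg g (if g z < g k then k else z) zs := rfl
    simp only [List.map_cons, List.foldl_cons, h1]
    have h2 : (if ((z, (g z : Int)) : Int × Int).2 < ((k, (g k : Int)) : Int × Int).2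
        then ((k, (g k : Int)) : Int × Int) else (z, g z))
        = ((if g z < g k then k else z), (g (if g z < g k then k else z) : Int)) := by
      by_cases hgk : g z < g k
      · simp only [if_pos hgk]
        rw [if_pos]
        exact_mod_cast hgk
      · simp only [if_neg hgk]
        rw [if_neg]
        intro hc
        exact hgk (by exact_mod_cast hc)
    rw [h2]
    exact ih _

lemma pvMaxByCount_eq_pvArg (v : Int) (rest : List Int) :
    pvMaxByCount (v :: rest) = pvArg (fun y => (v :: rest).count y) v rest := rfl

lemma pvMostCommon1_eq_pvMaxByCount (xs : List Int) (hx : xs ≠ []) :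
    pvMostCommon1 xs = pvMaxByCount xs := by
  obtain ⟨v, rest, rfl⟩ := List.exists_cons_of_ne_nil hx
  have hitems : (PySem.Dict.counter (v :: rest)).items =
      (v :: (PySem.Set.ofList rest).discard v).map (fun k => (k, ((v :: rest).count k : Int))) := by
    rw [PySem.Dict.items_counter, PySem.Set.ofList_cons]
  rw [pvMaxByCount_eq_pvArg]
  unfold pvMostCommon1
  rw [hitems]
  simp only [List.map_cons]
  rw [pvArg_pairs (fun y => (v :: rest).count y) ((PySem.Set.ofList rest).discard v) v]
  have hdis : (PySem.Set.ofList rest).discard v = (PySem.Set.ofList rest).filter (fun y => y ≠ v) := by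
    show (PySem.Set.ofList rest).filter (fun y => !y == v) = _
    apply List.filter_congr
    intro y _
    simp [Bool.beq_eq_decide_eq]
  rw [hdis, pvArg_filter_ne _ _ _ _ (le_refl _), pvArg_dedup]

lemma pvMaxByCount_mem (xs : List Int) (hx : xs ≠ []) : pvMaxByCount xs ∈ xs := by
  obtain ⟨v, rest, rfl⟩ := List.exists_cons_of_ne_nil hx
  rw [pvMaxByCount_eq_pvArg]
  rcases pvArg_mem (fun y => (v :: rest).count y) v rest with h | h
  · rw [h]; exact List.mem_cons_self
  · exact List.mem_cons_of_mem _ h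

lemma pvGetD_set (l : List Int) (i j : Nat) (a d : Int) :
    (l.set i a).getD j d = if i = j ∧ i < l.length then a else l.getD j d := by
  by_cases h1 : i = j
  · subst h1
    by_cases h2 : i < l.length
    · simp [List.getD_eq_getElem?_getD, h2]
    · rw [List.getD_eq_getElem?_getD, List.getElem?_eq_none (by simpa using Nat.le_of_not_lt h2),
        if_neg (by tauto)]
      rw [List.getD_eq_getElem?_getD, List.getElem?_eq_none (Nat.le_of_not_lt h2)]
  · simp [List.getD_eq_getElem?_getD, List.getElem?_set_ne h1, h1]

lemma pvGetDRow_set (g : List (List Int)) (i j : Nat) (a : List Int) :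
    (g.set i a).getD j [] = if i = j ∧ i < g.length then a else g.getD j [] := by
  by_cases h1 : i = j
  · subst h1
    by_cases h2 : i < g.length
    · simp [List.getD_eq_getElem?_getD, h2]
    · rw [List.getD_eq_getElem?_getD, List.getElem?_eq_none (by simpa using Nat.le_of_not_lt h2),
        if_neg (by tauto)]
      rw [List.getD_eq_getElem?_getD, List.getElem?_eq_none (Nat.le_of_not_lt h2)]
  · simp [List.getD_eq_getElem?_getD, List.getElem?_set_ne h1, h1]

def pvCells (h w : Nat) : List (Nat × Nat) :=
  (List.range h).flatMap (fun r => (List.range w).map (fun c => (r, c)))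

lemma mem_pvCells (h w : Nat) (p : Nat × Nat) :
    p ∈ pvCells h w ↔ p.1 < h ∧ p.2 < w := by
  cases p with
  | mk a b => simp [pvCells, List.mem_flatMap, List.mem_range, List.mem_map, eq_comm]

lemma nodup_pvCells (h w : Nat) : (pvCells h w).Nodup := by
  have : pvCells h w = (List.range h) ×ˢ (List.range w) := rfl
  rw [this]
  exact List.Nodup.product List.nodup_range List.nodup_range

def pvShape (h w : Nat) (g : List (List Int)) : Prop :=
  g.length = h ∧ ∀ r, r < h → w ≤ (g.getD r []).length

lemma pvSet2_lengths (g : List (List Int)) (r c : Nat) (v : Int) :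
    (pvSet2 g r c v).length = g.length ∧
    ∀ r', ((pvSet2 g r c v).getD r' []).length = (g.getD r' []).length := by
  refine ⟨by simp [pvSet2], ?_⟩
  intro r'
  unfold pvSet2
  rw [pvGetDRow_set]
  split_ifs with h
  · rw [← h.1]; simp
  · rfl

lemma pvGet2_set2_ne (g : List (List Int)) (r c : Nat) (v : Int) (r' c' : Nat)
    (hne : ¬(r' = r ∧ c' = c)) :
    pvGet2 (pvSet2 g r c v) r' c' = pvGet2 g r' c' := by
  unfold pvGet2 pvSet2
  rw [pvGetDRow_set]
  split_ifs with h
  · rw [← h.1]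
    rw [pvGetD_set]
    rw [if_neg (by rw [← h.1] at hne; tauto)]
  · rfl

lemma pvGet2_set2_self (g : List (List Int)) (r c : Nat) (v : Int)
    (hr : r < g.length) (hc : c < (g.getD r []).length) :
    pvGet2 (pvSet2 g r c v) r c = v := by
  unfold pvGet2 pvSet2
  rw [pvGetDRow_set, if_pos ⟨rfl, hr⟩, pvGetD_set, if_pos ⟨rfl, hc⟩]

lemma pvNbrsB_mem_ne_zero (res : List (List Int)) (h w r c : Nat) (x : Int)
    (hx : x ∈ pvNbrsB res h w r c) : x ≠ 0 := by
  unfold pvNbrsB at hx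
  rw [PySem.List.foldl_append_ite
    (p := fun p : Int × Int => 0 ≤ p.1 ∧ p.1 < (h : Int) ∧ 0 ≤ p.2 ∧ p.2 < (w : Int) ∧
      pvGet2 res p.1.toNat p.2.toNat ≠ 0)
    (f := fun p : Int × Int => pvGet2 res p.1.toNat p.2.toNat)] at hx
  simp only [List.nil_append, List.mem_map, List.mem_filter, decide_eq_true_eq] at hx
  obtain ⟨p, ⟨_, hcond⟩, rfl⟩ := hx
  exact hcond.2.2.2.2

lemma pvGet2_apply_notmem (fills : List (Nat × Nat × Int)) (g : List (List Int)) (r c : Nat)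
    (hnm : (r, c) ∉ fills.map (fun f => (f.1, f.2.1))) :
    pvGet2 (fills.foldl (fun g f => pvSet2 g f.1 f.2.1 f.2.2) g) r c = pvGet2 g r c := by
  induction fills generalizing g with
  | nil => rfl
  | cons f fills ih =>
    simp only [List.map_cons, List.mem_cons, not_or] at hnm
    rw [List.foldl_cons, ih _ hnm.2, pvGet2_set2_ne]
    intro ⟨h1, h2⟩
    exact hnm.1 (by rw [h1, h2])

lemma pvGet2_apply_mem (fills : List (Nat × Nat × Int)) (g : List (List Int))
    (hnd : (fills.map (fun f => (f.1, f.2.1))).Nodup)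
    (hbd : ∀ f ∈ fills, f.1 < g.length ∧ f.2.1 < (g.getD f.1 []).length) :
    ∀ f ∈ fills,
      pvGet2 (fills.foldl (fun g f => pvSet2 g f.1 f.2.1 f.2.2) g) f.1 f.2.1 = f.2.2 := by
  induction fills generalizing g with
  | nil => intro f hf; cases hf
  | cons f0 fills ih =>
    simp only [List.map_cons, List.nodup_cons] at hnd
    intro f hf
    rcases List.mem_cons.mp hf with rfl | hf'
    · rw [List.foldl_cons, pvGet2_apply_notmem _ _ _ _ hnd.1]
      exact pvGet2_set2_self _ _ _ _ (hbd f List.mem_cons_self).1 (hbd f List.mem_cons_self).2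
    · rw [List.foldl_cons]
      refine ih _ hnd.2 ?_ f hf'
      intro f' hf''
      have hb := hbd f' (List.mem_cons_of_mem _ hf'')
      have hl := pvSet2_lengths g f0.1 f0.2.1 f0.2.2
      rw [hl.1, hl.2]
      exact hb

abbrev pvCondA (res : List (List Int)) (h w : Nat) (p : Nat × Nat) : Prop :=
  pvGet2 res p.1 p.2 = 0 ∧ pvNbrsB res h w p.1 p.2 ≠ []

lemma foldl_pvCells {γ : Type} (G : γ → Nat × Nat → γ) (h w : Nat) (init : γ) :
    (pvCells h w).foldl G init =
    (List.range h).foldl (fun acc r =>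
      (List.range w).foldl (fun acc c => G acc (r, c)) acc) init := by
  rw [pvCells, List.foldl_flatMap]
  simp [List.foldl_map]

lemma pvZeros_eq (res : List (List Int)) (h w : Nat) :
    pvZeros res h w = (pvCells h w).filter (fun p => decide (pvGet2 res p.1 p.2 = 0)) := by
  have h1 : pvZeros res h w = (pvCells h w).foldl
      (fun acc p => if pvGet2 res p.1 p.2 = 0 then acc ++ [p] else acc) [] :=
    (foldl_pvCells (G := fun acc p => if pvGet2 res p.1 p.2 = 0 then acc ++ [p] else acc) h w []).symm
  rw [h1, PySem.List.foldl_append_ite_eq_filter, List.nil_append]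

lemma pvFills_eq_filter (res : List (List Int)) (h w : Nat) (pending : List (Nat × Nat)) :
    pvFills res h w pending =
      (pending.filter (fun p => decide (pvNbrsB res h w p.1 p.2 ≠ []))).map
        (fun p => (p.1, p.2, pvMaxByCount (pvNbrsB res h w p.1 p.2))) := by
  rw [pvFills, PySem.List.foldl_append_ite
    (p := fun p : Nat × Nat => pvNbrsB res h w p.1 p.2 ≠ [])
    (f := fun p : Nat × Nat => (p.1, p.2, pvMaxByCount (pvNbrsB res h w p.1 p.2))),
    List.nil_append]

lemma pvFills_eq (res : List (List Int)) (h w : Nat) :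
    pvFills res h w (pvZeros res h w) =
      ((pvCells h w).filter (fun p => decide (pvCondA res h w p))).map
        (fun p => (p.1, p.2, pvMaxByCount (pvNbrsB res h w p.1 p.2))) := by
  rw [pvFills_eq_filter, pvZeros_eq, List.filter_filter]
  congr 1
  apply List.filter_congr
  intro p _
  simp [pvCondA, and_comm]

lemma pvStepA_eq_cells (res : List (List Int)) (h w : Nat) :
    pvStepA res h w = (pvCells h w).foldl
      (fun st p => if pvCondA res h w p then
          (pvSet2 st.1 p.1 p.2 (pvMostCommon1 (pvNbrsB res h w p.1 p.2)), true)
        else st)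
      (res.map (fun row => row), false) := by
  have h1 : pvStepA res h w = (pvCells h w).foldl
      (fun st p => if pvGet2 res p.1 p.2 = 0 then
          if pvNbrsA res h w p.1 p.2 ≠ [] then
            (pvSet2 st.1 p.1 p.2 (pvMostCommon1 (pvNbrsA res h w p.1 p.2)), true)
          else st
        else st)
      (res.map (fun row => row), false) :=
    (foldl_pvCells (G := fun st p => if pvGet2 res p.1 p.2 = 0 then
          if pvNbrsA res h w p.1 p.2 ≠ [] then
            (pvSet2 st.1 p.1 p.2 (pvMostCommon1 (pvNbrsA res h w p.1 p.2)), true)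
          else st
        else st) h w _).symm
  rw [h1]
  congr 1
  funext st p
  simp only [pvNbrs_eq, pvCondA]
  split_ifs <;> tauto

lemma pvStepA_fst (res : List (List Int)) (h w : Nat) :
    (pvStepA res h w).1 =
      (pvFills res h w (pvZeros res h w)).foldl
        (fun g f => pvSet2 g f.1 f.2.1 f.2.2) res := by
  rw [pvStepA_eq_cells]
  have h2 : (fun (st : List (List Int) × Bool) (p : Nat × Nat) =>
        if pvCondA res h w p then
          (pvSet2 st.1 p.1 p.2 (pvMostCommon1 (pvNbrsB res h w p.1 p.2)), true)
        else st)
      = (fun st p => ((fun g p => if pvCondA res h w p then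
            pvSet2 g p.1 p.2 (pvMostCommon1 (pvNbrsB res h w p.1 p.2)) else g) st.1 p,
          (fun b p => if pvCondA res h w p then true else b) st.2 p)) := by
    funext st p
    simp only []
    split_ifs <;> rfl
  rw [h2, PySem.List.foldl_prod_mk
    (f := fun g p => if pvCondA res h w p then
      pvSet2 g p.1 p.2 (pvMostCommon1 (pvNbrsB res h w p.1 p.2)) else g)
    (g := fun b p => if pvCondA res h w p then true else b)]
  rw [PySem.List.foldl_ite_eq_foldl_filter (p := pvCondA res h w)]
  rw [pvFills_eq, List.foldl_map]
  rw [show (res.map fun row => row) = res from by simp]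
  apply PySem.List.foldl_congr_mem
  intro acc p hp
  have hne : pvNbrsB res h w p.1 p.2 ≠ [] := by
    have := (List.mem_filter.mp hp).2
    simp only [decide_eq_true_eq, pvCondA] at this
    exact this.2
  rw [pvMostCommon1_eq_pvMaxByCount _ hne]

lemma pvStepA_snd (res : List (List Int)) (h w : Nat) :
    (pvStepA res h w).2 = !decide (pvFills res h w (pvZeros res h w) = []) := by
  rw [pvStepA_eq_cells]
  have h2 : (fun (st : List (List Int) × Bool) (p : Nat × Nat) =>
        if pvCondA res h w p then
          (pvSet2 st.1 p.1 p.2 (pvMostCommon1 (pvNbrsB res h w p.1 p.2)), true)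
        else st)
      = (fun st p => ((fun g p => if pvCondA res h w p then
            pvSet2 g p.1 p.2 (pvMostCommon1 (pvNbrsB res h w p.1 p.2)) else g) st.1 p,
          (fun b p => if pvCondA res h w p then true else b) st.2 p)) := by
    funext st p
    simp only []
    split_ifs <;> rfl
  rw [h2, PySem.List.foldl_prod_mk
    (f := fun g p => if pvCondA res h w p then
      pvSet2 g p.1 p.2 (pvMostCommon1 (pvNbrsB res h w p.1 p.2)) else g)
    (g := fun b p => if pvCondA res h w p then true else b)]
  have h3 : (fun (b : Bool) (p : Nat × Nat) => if pvCondA res h w p then true else b)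
      = (fun b p => if (fun q => decide (pvCondA res h w q)) p = true then true else b) := by
    funext b p
    by_cases hc : pvCondA res h w p <;> simp [hc]
  rw [h3, PySem.List.foldl_if_true_eq]
  rw [pvFills_eq]
  rw [Bool.eq_iff_iff]
  simp [List.any_eq_true, List.filter_eq_nil_iff]

lemma pvShape_foldl (h w : Nat) (fills : List (Nat × Nat × Int)) (g : List (List Int))
    (hsh : pvShape h w g) :
    pvShape h w (fills.foldl (fun g f => pvSet2 g f.1 f.2.1 f.2.2) g) := by
  induction fills generalizing g with
  | nil => exact hsh
  | cons f fills ih =>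
    rw [List.foldl_cons]
    apply ih
    have hl := pvSet2_lengths g f.1 f.2.1 f.2.2
    exact ⟨by rw [hl.1]; exact hsh.1, fun r hr => by rw [hl.2]; exact hsh.2 r hr⟩

lemma pvCoords_fills (res : List (List Int)) (h w : Nat) :
    (pvFills res h w (pvZeros res h w)).map (fun f => (f.1, f.2.1)) =
      (pvCells h w).filter (fun p => decide (pvCondA res h w p)) := by
  rw [pvFills_eq, List.map_map]
  exact List.map_id'' (congrFun rfl) _

lemma pvZeros_after (res : List (List Int)) (h w : Nat) (hsh : pvShape h w res) :
    pvZeros ((pvFills res h w (pvZeros res h w)).foldl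
        (fun g f => pvSet2 g f.1 f.2.1 f.2.2) res) h w
    = (pvZeros res h w).filter
        (fun p => !(PySem.Set.contains (PySem.Set.ofList
          ((pvFills res h w (pvZeros res h w)).map (fun f => (f.1, f.2.1)))) p)) := by
  set F := pvFills res h w (pvZeros res h w) with hFdef
  have hK : F.map (fun f => (f.1, f.2.1)) =
      (pvCells h w).filter (fun p => decide (pvCondA res h w p)) := pvCoords_fills res h w
  have hKnd : (F.map (fun f => (f.1, f.2.1))).Nodup := by
    rw [hK]; exact (nodup_pvCells h w).filter _
  have hofK : PySem.Set.ofList (F.map (fun f => (f.1, f.2.1))) = F.map (fun f => (f.1, f.2.1)) :=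
    PySem.Set.ofList_eq_self_of_nodup _ hKnd
  have hbd : ∀ f ∈ F, f.1 < res.length ∧ f.2.1 < (res.getD f.1 []).length := by
    intro f hf
    rw [hFdef, pvFills_eq] at hf
    obtain ⟨p, hp, rfl⟩ := List.mem_map.mp hf
    have hpc := (mem_pvCells h w p).mp (List.mem_filter.mp hp).1
    exact ⟨by rw [hsh.1]; exact hpc.1, lt_of_lt_of_le hpc.2 (hsh.2 p.1 hpc.1)⟩
  rw [pvZeros_eq (F.foldl (fun g f => pvSet2 g f.1 f.2.1 f.2.2) res) h w,
    pvZeros_eq res h w, List.filter_filter]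
  apply List.filter_congr
  intro p hp
  rw [hofK]
  by_cases hKp : (p.1, p.2) ∈ F.map (fun f => (f.1, f.2.1))
  · obtain ⟨f, hf, hfp⟩ := List.mem_map.mp hKp
    have hp1 : f.1 = p.1 := congrArg Prod.fst hfp
    have hp2 : f.2.1 = p.2 := congrArg Prod.snd hfp
    have hget := pvGet2_apply_mem F res hKnd hbd f hf
    rw [hp1, hp2] at hget
    have hval : f.2.2 ≠ 0 := by
      rw [hFdef, pvFills_eq] at hf
      obtain ⟨q, hq, rfl⟩ := List.mem_map.mp hf
      have hne : pvNbrsB res h w q.1 q.2 ≠ [] := by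
        have := (List.mem_filter.mp hq).2
        simp only [decide_eq_true_eq, pvCondA] at this
        exact this.2
      exact pvNbrsB_mem_ne_zero res h w q.1 q.2 _ (pvMaxByCount_mem _ hne)
    rw [hget]
    have hpm : p ∈ F.map (fun f => (f.1, f.2.1)) := by simpa using hKp
    simp only [PySem.Set.contains_eq_listContains]
    simp [hval, hpm]
  · have h1 := pvGet2_apply_notmem F res p.1 p.2 hKp
    rw [h1]
    have hpm : p ∉ F.map (fun f => (f.1, f.2.1)) := by simpa using hKp
    simp only [PySem.Set.contains_eq_listContains]
    simp [hpm]

lemma pvLoop_eq (h w : Nat) : ∀ (n : Nat) (res : List (List Int)),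
    pvShape h w res → pvLoopA h w n res = pvLoopB h w n res (pvZeros res h w) := by
  intro n
  induction n with
  | zero => intro res _; rfl
  | succ n ih =>
    intro res hsh
    simp only [pvLoopA, pvLoopB]
    rw [pvStepA_snd, pvStepA_fst]
    by_cases hf : pvFills res h w (pvZeros res h w) = []
    · simp [hf]
    · rw [if_pos (show (!decide (pvFills res h w (pvZeros res h w) = [])) = true from by
        simp [hf]), if_neg hf]
      rw [ih _ (pvShape_foldl h w _ res hsh), pvZeros_after res h w hsh]

-- ===== VERDICT (by name: the statement is the Claim_ definition above) =====
theorem inpaint_by_neighbors_spec : Claim_equal_inpaint_by_neighbors := by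
  intro grid _ hpre
  unfold Spec_inpaint_by_neighbors inpaint_by_neighbors inpaint_by_neighbors_alt
  by_cases hg : grid = [] ∨ grid.headI = []
  · rw [if_pos hg, if_pos hg]
  · rw [if_neg hg, if_neg hg]
    rw [show grid.map (fun row => row) = grid from by simp]
    refine pvLoop_eq grid.length grid.headI.length _ grid ⟨rfl, ?_⟩
    intro r hr
    have hmem : grid.getD r [] ∈ grid := by
      rw [List.getD_eq_getElem?_getD, List.getElem?_eq_getElem hr]
      exact List.getElem_mem _
    exact hpre _ hmem
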